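-- pv_equiv track=rewrite | github.com/sherwinsathish/Projects | goaiagent.py | capture
-- ===== SOURCE A (Python) =====
-- def libcheck(board, x, y):
--     visited = set()
--     player = board[x][y]#1 or 2
--     return dfs(board, x, y, player, visited) #check liberties with dfs
--
-- def dfs(board, x, y, player, visited):
--     if (x, y) in visited:
--         return False
--     visited.add((x, y))#so no repeats
--     directions = [(-1, 0), (1, 0), (0, -1), (0, 1)] #orthogonal directions
--     for dx, dy in directions:
--         nx, ny = x + dx, y + dy
--         if 0 <= nx < len(board) and 0 <= ny < len(board): # within board bounds
--             if board[nx][ny] == 0: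
--                 return True
--             if board[nx][ny] == player and dfs(board, nx, ny, player, visited): #adjacent piece
--                 return True
--     return False
--
-- def capture(board, player):
--     opponent = 3 - player#1 or 2
--     captured = False
--     captured_count = 0
--     for x in range(len(board)):
--         for y in range(len(board)):
--             if board[x][y] == opponent and not libcheck(board, x, y):
--                 board[x][y] = 0  #captured stone 0
--                 captured = True
--                 captured_count += 1
--     return captured, captured_count
-- ===== SOURCE B (Python) =====
-- def group_has_liberty(board, x, y, opponent):
--     n = len(board)
--     seen = {(x, y)}
--     stack = [(x, y)]
--     while stack:
--         cx, cy = stack.pop()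
--         for nx, ny in ((cx - 1, cy), (cx + 1, cy), (cx, cy - 1), (cx, cy + 1)):
--             if 0 <= nx < n and 0 <= ny < n:
--                 if board[nx][ny] == 0:
--                     return True
--                 if board[nx][ny] == opponent and (nx, ny) not in seen:
--                     seen.add((nx, ny))
--                     stack.append((nx, ny))
--     return False
--
-- def capture(board, player):
--     opponent = 3 - player
--     count = 0
--     n = len(board)
--     for x in range(n):
--         for y in range(n):
--             if board[x][y] == opponent and not group_has_liberty(board, x, y, opponent):
--                 board[x][y] = 0
--                 count += 1
--     return count > 0, count
-- ===== Notes on version B (the rewrite author's own statement) =====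
-- stated objective: alternative
-- what changed: The per-stone liberty test is rewritten from A's recursive DFS threading a shared visited set with early-return (plus a separate captured flag) into an explicit-stack flood fill of the stone's group that marks cells when pushed; captures and the in-place board mutation are identical.
import Mathlib
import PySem

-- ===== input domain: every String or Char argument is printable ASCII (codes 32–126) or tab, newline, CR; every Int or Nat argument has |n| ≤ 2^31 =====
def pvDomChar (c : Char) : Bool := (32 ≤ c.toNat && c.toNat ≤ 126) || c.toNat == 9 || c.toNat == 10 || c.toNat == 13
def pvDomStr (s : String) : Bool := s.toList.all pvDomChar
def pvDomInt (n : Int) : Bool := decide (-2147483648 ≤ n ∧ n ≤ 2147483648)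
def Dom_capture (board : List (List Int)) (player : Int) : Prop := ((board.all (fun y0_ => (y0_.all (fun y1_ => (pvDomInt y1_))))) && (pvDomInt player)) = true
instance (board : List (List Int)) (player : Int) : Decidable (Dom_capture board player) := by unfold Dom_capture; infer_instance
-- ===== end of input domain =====

-- B replaces A's per-stone recursive DFS (shared mutable visited set) by an explicit-stack
-- flood fill of the stone's group; same captures, same in-place board mutation, same result.

-- ===== PORT A =====
-- board[x][y] (indices always guarded in range by the code / Pre_)
def pvCell (board : List (List Int)) (x y : Int) : Int :=
  PySem.List.pyGetD (PySem.List.pyGetD board x []) y 0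

-- board[x][y] = 0
def pvSetCell (board : List (List Int)) (x y : Int) : List (List Int) :=
  PySem.List.pySetD board x (PySem.List.pySetD (PySem.List.pyGetD board x []) y 0)

def pvDirs : List (Int × Int) := [(-1, 0), (1, 0), (0, -1), (0, 1)]

-- the 'for dx, dy in directions' loop of dfs, threading the (shared, mutated) visited set;
-- 'rec' is the recursive call at the next depth
def dfsALoop (board : List (List Int)) (player : Int)
    (rec : Int → Int → PySem.Set (Int × Int) → Bool × PySem.Set (Int × Int))
    (x y : Int) : List (Int × Int) → PySem.Set (Int × Int) → Bool × PySem.Set (Int × Int)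
  | [], visited => (false, visited)
  | (dx, dy) :: rest, visited =>
    let nx := x + dx
    let ny := y + dy
    if 0 ≤ nx ∧ nx < PySem.List.len board ∧ 0 ≤ ny ∧ ny < PySem.List.len board then
      if pvCell board nx ny = 0 then (true, visited)
      else if pvCell board nx ny = player then
        match rec nx ny visited with
        | (true, v') => (true, v')
        | (false, v') => dfsALoop board player rec x y rest v'
      else dfsALoop board player rec x y rest visited
    else dfsALoop board player rec x y rest visited

-- dfs; the fuel only makes the recursion structural (n*n+1 levels always suffice: each level
-- adds a fresh in-bounds cell to visited, and at fuel 0 the cell is necessarily visited,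
-- so the returned (false, visited) is what Python returns there too)
def dfsA (board : List (List Int)) (player : Int) :
    Nat → Int → Int → PySem.Set (Int × Int) → Bool × PySem.Set (Int × Int)
  | 0, _, _, visited => (false, visited)
  | fuel + 1, x, y, visited =>
    if (x, y) ∈ visited then (false, visited)
    else dfsALoop board player (fun nx ny v => dfsA board player fuel nx ny v) x y pvDirs
      (PySem.Set.add visited (x, y))

-- libcheck
def libcheckA (board : List (List Int)) (x y : Int) : Bool :=
  (dfsA board (pvCell board x y) (board.length * board.length + 1) x y PySem.Set.empty).1

-- body of the double scan: state = (board, captured, captured_count)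
def captureStepA (opponent : Int) (st : List (List Int) × Bool × Int) (x y : Int) :
    List (List Int) × Bool × Int :=
  if pvCell st.1 x y = opponent ∧ libcheckA st.1 x y = false then
    (pvSetCell st.1 x y, true, st.2.2 + 1)
  else st

def capture (board : List (List Int)) (player : Int) : Bool × Int :=
  let opponent := 3 - player
  let st := (PySem.List.pyRange 0 (PySem.List.len board)).foldl
    (fun st x => (PySem.List.pyRange 0 (PySem.List.len st.1)).foldl
      (fun st y => captureStepA opponent st x y) st)
    (board, false, 0)
  (st.2.1, st.2.2)

-- ===== PORT B =====
-- the four orthogonal neighbours ((cx-1,cy), (cx+1,cy), (cx,cy-1), (cx,cy+1))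
def bNbrs (cx cy : Int) : List (Int × Int) :=
  [(cx - 1, cy), (cx + 1, cy), (cx, cy - 1), (cx, cy + 1)]

-- the 'for nx, ny in …' loop over a popped cell's neighbours: early True on a liberty,
-- otherwise push unseen group stones
def bDirsB (board : List (List Int)) (opponent : Int) :
    List (Int × Int) → List (Int × Int) → PySem.Set (Int × Int) →
    Bool × List (Int × Int) × PySem.Set (Int × Int)
  | [], stack, seen => (false, stack, seen)
  | (nx, ny) :: rest, stack, seen =>
    if 0 ≤ nx ∧ nx < PySem.List.len board ∧ 0 ≤ ny ∧ ny < PySem.List.len board then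
      if pvCell board nx ny = 0 then (true, stack, seen)
      else if pvCell board nx ny = opponent ∧ ¬ (nx, ny) ∈ seen then
        bDirsB board opponent rest ((nx, ny) :: stack) (PySem.Set.add seen (nx, ny))
      else bDirsB board opponent rest stack seen
    else bDirsB board opponent rest stack seen

-- the 'while stack:' loop (stack top = list head); fuel 2n²+2 always suffices: every
-- iteration pops once and each cell is pushed at most once
def bLoop (board : List (List Int)) (opponent : Int) :
    Nat → List (Int × Int) → PySem.Set (Int × Int) → Bool
  | 0, _, _ => false
  | _ + 1, [], _ => false
  | fuel + 1, (cx, cy) :: stack, seen =>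
    match bDirsB board opponent (bNbrs cx cy) stack seen with
    | (true, _, _) => true
    | (false, stack', seen') => bLoop board opponent fuel stack' seen'

def groupHasLiberty (board : List (List Int)) (x y opponent : Int) : Bool :=
  bLoop board opponent (2 * board.length * board.length + 2) [(x, y)]
    (PySem.Set.ofList [(x, y)])

-- body of the double scan: state = (board, count)
def captureStepB (opponent : Int) (st : List (List Int) × Int) (x y : Int) :
    List (List Int) × Int :=
  if pvCell st.1 x y = opponent ∧ groupHasLiberty st.1 x y opponent = false then
    (pvSetCell st.1 x y, st.2 + 1)
  else st

def capture_alt (board : List (List Int)) (player : Int) : Bool × Int :=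
  let opponent := 3 - player
  let n := PySem.List.len board
  let st := (PySem.List.pyRange 0 n).foldl
    (fun st x => (PySem.List.pyRange 0 n).foldl
      (fun st y => captureStepB opponent st x y) st)
    (board, 0)
  (decide (0 < st.2), st.2)

-- ===== PRECONDITION & SPEC =====
-- Pre_ excludes exactly the boards with a row shorter than len(board): the scan reads
-- board[x][y] for all x,y < len(board), so Python A raises IndexError there (and only there).
def Pre_capture (board : List (List Int)) (player : Int) : Prop :=
  ∀ row ∈ board, board.length ≤ row.length
instance (board : List (List Int)) (player : Int) : Decidable (Pre_capture board player) := by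
  unfold Pre_capture; infer_instance

def pvWitness_capture : List (List Int) × Int := ([[1, 2], [0, 1]], 1)

def Spec_capture (board : List (List Int)) (player : Int) (out : Bool × Int) : Prop :=
  out = capture_alt board player
instance (board : List (List Int)) (player : Int) (out : Bool × Int) :
    Decidable (Spec_capture board player out) := by unfold Spec_capture; infer_instance

-- ===== CLAIM (what is proved, stated in full; the proofs are below) =====
def Claim_equal_capture : Prop := ∀ (board : List (List Int)) (player : Int),
  Dom_capture board player → Pre_capture board player →
  Spec_capture board player (capture board player)

-- ===== LEMMAS AND PROOFS =====

-- (x, y) is on the n×n board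
def InG (board : List (List Int)) (c : Int × Int) : Prop :=
  0 ≤ c.1 ∧ c.1 < PySem.List.len board ∧ 0 ≤ c.2 ∧ c.2 < PySem.List.len board

def Adj (c d : Int × Int) : Prop := d ∈ bNbrs c.1 c.2

-- cells reachable from s through in-bounds cells holding the value o
inductive ReachP (board : List (List Int)) (o : Int) (s : Int × Int) : Int × Int → Prop
  | base : ReachP board o s s
  | step {c d} : ReachP board o s c → InG board d → Adj c d →
      pvCell board d.1 d.2 = o → ReachP board o s d

-- the group of s has a liberty
def HasLib (board : List (List Int)) (o : Int) (s : Int × Int) : Prop :=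
  ∃ c d, ReachP board o s c ∧ Adj c d ∧ InG board d ∧ pvCell board d.1 d.2 = 0

-- c's neighbourhood is fully examined: no liberty next to c, o-neighbours all in V
def Settled (board : List (List Int)) (o : Int) (V : PySem.Set (Int × Int))
    (c : Int × Int) : Prop :=
  ∀ d ∈ bNbrs c.1 c.2, InG board d →
    pvCell board d.1 d.2 ≠ 0 ∧ (pvCell board d.1 d.2 = o → d ∈ V)

def gridList (board : List (List Int)) : List (Int × Int) :=
  (List.range board.length).flatMap fun (i : Nat) =>
    (List.range board.length).map fun (j : Nat) => ((i : Int), (j : Int))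

-- number of board cells not yet in V (the termination/fuel measure)
def unvis (board : List (List Int)) (V : PySem.Set (Int × Int)) : Nat :=
  (gridList board).countP fun c => !decide (c ∈ V)

lemma mem_gridList {board : List (List Int)} {c : Int × Int} :
    c ∈ gridList board ↔ InG board c := by
  constructor
  · intro h
    rw [gridList, List.mem_flatMap] at h
    obtain ⟨i, hi, h2⟩ := h
    rw [List.mem_map] at h2
    obtain ⟨j, hj, rfl⟩ := h2
    rw [List.mem_range] at hi hj
    exact ⟨Int.natCast_nonneg i, by simp [PySem.List.len_eq]; exact_mod_cast hi,
      Int.natCast_nonneg j, by simp [PySem.List.len_eq]; exact_mod_cast hj⟩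
  · intro h
    obtain ⟨h1, h2, h3, h4⟩ := h
    rw [PySem.List.len_eq] at h2 h4
    simp only [gridList, List.mem_flatMap, List.mem_map, List.mem_range]
    refine ⟨c.1.toNat, by omega, c.2.toNat, by omega, ?_⟩
    have e1 : (c.1.toNat : Int) = c.1 := Int.toNat_of_nonneg h1
    have e2 : (c.2.toNat : Int) = c.2 := Int.toNat_of_nonneg h3
    cases c
    simp_all

lemma unvis_le (board : List (List Int)) (V : PySem.Set (Int × Int)) :
    unvis board V ≤ board.length * board.length := by
  calc unvis board V ≤ (gridList board).length := List.countP_le_length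
    _ = board.length * board.length := by simp [gridList]

lemma countP_lt_of_mem {α : Type} (l : List α) (p q : α → Bool)
    (hpq : ∀ a, q a = true → p a = true) {c : α} (hc : c ∈ l)
    (hp : p c = true) (hq : q c = false) : l.countP q < l.countP p := by
  obtain ⟨l1, l2, rfl⟩ := List.append_of_mem hc
  rw [List.countP_append, List.countP_append, List.countP_cons, List.countP_cons, hp, hq]
  norm_num
  have h1 : l1.countP q ≤ l1.countP p := List.countP_mono_left (fun a _ => hpq a)
  have h2 : l2.countP q ≤ l2.countP p := List.countP_mono_left (fun a _ => hpq a)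
  omega

lemma unvis_add_lt {board : List (List Int)} {V : PySem.Set (Int × Int)} {c : Int × Int}
    (hin : InG board c) (hnot : ¬ c ∈ V) :
    unvis board (PySem.Set.add V c) < unvis board V := by
  refine countP_lt_of_mem (gridList board) _ _ ?_ (mem_gridList.mpr hin) ?_ ?_
  · intro a ha
    simp only [Bool.not_eq_eq_eq_not, Bool.not_true, decide_eq_false_iff_not] at ha ⊢
    intro hav
    exact ha ((PySem.Set.mem_add V c a).mpr (Or.inl hav))
  · simpa using hnot
  · simp [PySem.Set.mem_add]

lemma unvis_mono {board : List (List Int)} {V W : PySem.Set (Int × Int)}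
    (h : ∀ x ∈ V, x ∈ W) : unvis board W ≤ unvis board V := by
  apply List.countP_mono_left
  intro a _ ha
  simp only [Bool.not_eq_eq_eq_not, Bool.not_true, decide_eq_false_iff_not] at ha ⊢
  exact fun haW => ha (h a haW)

lemma Settled_mono {board : List (List Int)} {o : Int} {V W : PySem.Set (Int × Int)}
    {c : Int × Int} (hVW : ∀ x ∈ V, x ∈ W) (h : Settled board o V c) :
    Settled board o W c := by
  intro d hd hInG
  exact ⟨(h d hd hInG).1, fun hc => hVW d ((h d hd hInG).2 hc)⟩

lemma ReachP_trans {board : List (List Int)} {o : Int} {s c d : Int × Int}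
    (h1 : ReachP board o s c) (h2 : ReachP board o c d) : ReachP board o s d := by
  induction h2 with
  | base => exact h1
  | step hr hInG hAdj hcell ih => exact ReachP.step ih hInG hAdj hcell

lemma HasLib_of_adj {board : List (List Int)} {o : Int} {c d : Int × Int}
    (hInG : InG board d) (hAdj : Adj c d) (ho : pvCell board d.1 d.2 = o)
    (h : HasLib board o d) : HasLib board o c := by
  obtain ⟨e, f, hr, ha, hg, h0⟩ := h
  exact ⟨e, f, ReachP_trans (ReachP.step ReachP.base hInG hAdj ho) hr, ha, hg, h0⟩

lemma mem_bNbrs_of_dirs {x y dx dy : Int} (h : (dx, dy) ∈ pvDirs) :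
    (x + dx, y + dy) ∈ bNbrs x y := by
  simp only [pvDirs, List.mem_cons, List.not_mem_nil, or_false,
    Prod.mk.injEq] at h
  rcases h with ⟨rfl, rfl⟩ | ⟨rfl, rfl⟩ | ⟨rfl, rfl⟩ | ⟨rfl, rfl⟩ <;>
    simp [bNbrs, Prod.ext_iff] <;> omega

lemma reach_in_closed {board : List (List Int)} {o : Int} {s : Int × Int}
    {V : PySem.Set (Int × Int)} (hs : s ∈ V)
    (hset : ∀ c ∈ V, Settled board o V c) :
    ∀ c, ReachP board o s c → c ∈ V := by
  intro c h
  induction h with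
  | base => exact hs
  | step hr hInG hAdj hcell ih => exact ((hset _ ih) _ hAdj hInG).2 hcell

lemma not_hasLib_of_closed {board : List (List Int)} {o : Int} {s : Int × Int}
    {V : PySem.Set (Int × Int)} (hs : s ∈ V)
    (hset : ∀ c ∈ V, Settled board o V c) : ¬ HasLib board o s := by
  rintro ⟨c, d, hr, hAdj, hInG, h0⟩
  exact ((hset c (reach_in_closed hs hset c hr)) d hAdj hInG).1 h0

-- ---- A side ----

lemma dfsALoop_spec (board : List (List Int)) (o : Int) (fr : Nat)
    (rec : Int → Int → PySem.Set (Int × Int) → Bool × PySem.Set (Int × Int))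
    (hrec : ∀ nx ny V b V', InG board (nx, ny) → unvis board V < fr →
      rec nx ny V = (b, V') →
      (b = true → HasLib board o (nx, ny)) ∧
      (b = false → (∀ c ∈ V, c ∈ V') ∧ (nx, ny) ∈ V' ∧
        ∀ c ∈ V', ¬ c ∈ V → Settled board o V' c)) :
    ∀ (dirs : List (Int × Int)) (x y : Int) V b V',
      (∀ d ∈ dirs, d ∈ pvDirs) → unvis board V < fr →
      dfsALoop board o rec x y dirs V = (b, V') →
      (b = true → HasLib board o (x, y)) ∧
      (b = false → (∀ c ∈ V, c ∈ V') ∧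
        (∀ c ∈ V', ¬ c ∈ V → Settled board o V' c) ∧
        (∀ d ∈ dirs, InG board (x + d.1, y + d.2) →
          pvCell board (x + d.1) (y + d.2) ≠ 0 ∧
          (pvCell board (x + d.1) (y + d.2) = o → (x + d.1, y + d.2) ∈ V'))) := by
  intro dirs
  induction dirs with
  | nil =>
    intro x y V b V' _ _ h
    simp only [dfsALoop, Prod.mk.injEq] at h
    obtain ⟨rfl, rfl⟩ := h
    exact ⟨by simp, fun _ => ⟨fun c hc => hc, fun c hc hn => absurd hc hn, by simp⟩⟩
  | cons d rest ih =>
    obtain ⟨dx, dy⟩ := d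
    intro x y V b V' hdirs hV h
    have hd : (dx, dy) ∈ pvDirs := hdirs _ List.mem_cons_self
    have hrest : ∀ d ∈ rest, d ∈ pvDirs := fun d hd => hdirs d (List.mem_cons_of_mem _ hd)
    simp only [dfsALoop] at h
    by_cases hb : 0 ≤ x + dx ∧ x + dx < PySem.List.len board ∧ 0 ≤ y + dy ∧
        y + dy < PySem.List.len board
    · rw [if_pos hb] at h
      by_cases h0 : pvCell board (x + dx) (y + dy) = 0
      · rw [if_pos h0] at h
        simp only [Prod.mk.injEq] at h
        obtain ⟨rfl, rfl⟩ := h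
        refine ⟨fun _ => ⟨(x, y), (x + dx, y + dy), ReachP.base,
          mem_bNbrs_of_dirs hd, hb, h0⟩, by simp⟩
      · rw [if_neg h0] at h
        by_cases ho : pvCell board (x + dx) (y + dy) = o
        · rw [if_pos ho] at h
          rcases hr : rec (x + dx) (y + dy) V with ⟨cb, v'⟩
          rw [hr] at h
          have Hc := hrec (x + dx) (y + dy) V cb v' hb hV hr
          cases cb
          · obtain ⟨hmono, hmem, hdelta⟩ := Hc.2 rfl
            have hv' : unvis board v' < fr := lt_of_le_of_lt (unvis_mono hmono) hV
            have IH := ih x y v' b V' hrest hv' h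
            refine ⟨IH.1, ?_⟩
            intro hbf
            obtain ⟨i1, i2, i3⟩ := IH.2 hbf
            refine ⟨fun c hc => i1 c (hmono c hc), ?_, ?_⟩
            · intro c hc hcv
              by_cases hcv' : c ∈ v'
              · exact Settled_mono i1 (hdelta c hcv' hcv)
              · exact i2 c hc hcv'
            · intro d hd'
              rcases List.mem_cons.mp hd' with rfl | hd''
              · exact fun _ => ⟨h0, fun _ => i1 _ hmem⟩
              · exact i3 d hd''
          · simp only [Prod.mk.injEq] at h
            obtain ⟨rfl, rfl⟩ := h
            refine ⟨fun _ => HasLib_of_adj (show InG board (x + dx, y + dy) from hb) (mem_bNbrs_of_dirs hd) ho (Hc.1 rfl), by simp⟩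
        · rw [if_neg ho] at h
          have IH := ih x y V b V' hrest hV h
          refine ⟨IH.1, ?_⟩
          intro hbf
          obtain ⟨i1, i2, i3⟩ := IH.2 hbf
          refine ⟨i1, i2, ?_⟩
          intro d hd'
          rcases List.mem_cons.mp hd' with rfl | hd''
          · exact fun _ => ⟨h0, fun hco => absurd hco ho⟩
          · exact i3 d hd''
    · rw [if_neg hb] at h
      have IH := ih x y V b V' hrest hV h
      refine ⟨IH.1, ?_⟩
      intro hbf
      obtain ⟨i1, i2, i3⟩ := IH.2 hbf
      refine ⟨i1, i2, ?_⟩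
      intro d hd'
      rcases List.mem_cons.mp hd' with rfl | hd''
      · exact fun hing => absurd hing hb
      · exact i3 d hd'' 

lemma dfsA_spec (board : List (List Int)) (o : Int) :
    ∀ (fuel : Nat) (x y : Int) V b V',
      InG board (x, y) → unvis board V < fuel →
      dfsA board o fuel x y V = (b, V') →
      (b = true → HasLib board o (x, y)) ∧
      (b = false → (∀ c ∈ V, c ∈ V') ∧ (x, y) ∈ V' ∧
        ∀ c ∈ V', ¬ c ∈ V → Settled board o V' c) := by
  intro fuel
  induction fuel with
  | zero => intro x y V b V' _ hV _; omega
  | succ fuel ih =>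
    intro x y V b V' hin hV h
    simp only [dfsA] at h
    by_cases hv : (x, y) ∈ V
    · rw [if_pos hv] at h
      simp only [Prod.mk.injEq] at h
      obtain ⟨rfl, rfl⟩ := h
      exact ⟨by simp, fun _ => ⟨fun c hc => hc, hv, fun c hc hn => absurd hc hn⟩⟩
    · rw [if_neg hv] at h
      have hV1 : unvis board (PySem.Set.add V (x, y)) < fuel := by
        have := unvis_add_lt hin hv
        omega
      have H := dfsALoop_spec board o fuel (fun nx ny v => dfsA board o fuel nx ny v)
        (fun nx ny W cb W' hing hW hr => ih nx ny W cb W' hing hW hr)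
        pvDirs x y (PySem.Set.add V (x, y)) b V' (fun d hd => hd) hV1 h
      refine ⟨H.1, ?_⟩
      intro hbf
      obtain ⟨i1, i2, i3⟩ := H.2 hbf
      have hmem : (x, y) ∈ V' := i1 _ ((PySem.Set.mem_add V (x, y) (x, y)).mpr (Or.inr rfl))
      refine ⟨fun c hc => i1 c ((PySem.Set.mem_add V (x, y) c).mpr (Or.inl hc)), hmem, ?_⟩
      intro c hc hcv
      by_cases hcxy : c = (x, y)
      · subst hcxy
        intro d hd hing
        simp only [bNbrs, List.mem_cons, List.not_mem_nil, or_false] at hd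
        rcases hd with rfl | rfl | rfl | rfl
        · have i3' := i3 (-1, 0) (by simp [pvDirs])
          have e1 : x + ((-1 : Int), (0 : Int)).1 = x - 1 := by ring
          have e2 : y + ((-1 : Int), (0 : Int)).2 = y := by ring
          rw [e1, e2] at i3'
          exact i3' hing
        · have i3' := i3 (1, 0) (by simp [pvDirs])
          have e1 : x + ((1 : Int), (0 : Int)).1 = x + 1 := by ring
          have e2 : y + ((1 : Int), (0 : Int)).2 = y := by ring
          rw [e1, e2] at i3'
          exact i3' hing
        · have i3' := i3 (0, -1) (by simp [pvDirs])
          have e1 : x + ((0 : Int), (-1 : Int)).1 = x := by ring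
          have e2 : y + ((0 : Int), (-1 : Int)).2 = y - 1 := by ring
          rw [e1, e2] at i3'
          exact i3' hing
        · have i3' := i3 (0, 1) (by simp [pvDirs])
          have e1 : x + ((0 : Int), (1 : Int)).1 = x := by ring
          have e2 : y + ((0 : Int), (1 : Int)).2 = y + 1 := by ring
          rw [e1, e2] at i3'
          exact i3' hing
      · have hnc : ¬ c ∈ PySem.Set.add V (x, y) := by
          rw [PySem.Set.mem_add]
          rintro (hc' | hc')
          · exact hcv hc'
          · exact hcxy hc'
        exact i2 c hc hnc

lemma libcheckA_iff (board : List (List Int)) (x y : Int) (hin : InG board (x, y)) :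
    (libcheckA board x y = true ↔ HasLib board (pvCell board x y) (x, y)) := by
  unfold libcheckA
  rcases hd : dfsA board (pvCell board x y) (board.length * board.length + 1) x y
    PySem.Set.empty with ⟨b, V'⟩
  have hV : unvis board PySem.Set.empty < board.length * board.length + 1 := by
    have := unvis_le board PySem.Set.empty
    omega
  have H := dfsA_spec board (pvCell board x y) _ x y _ b V' hin hV hd
  constructor
  · exact fun ht => H.1 ht
  · intro hl
    cases b with
    | true => rfl
    | false =>
      obtain ⟨_, hmem, hdelta⟩ := H.2 rfl
      have hset : ∀ c ∈ V', Settled board (pvCell board x y) V' c :=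
        fun c hc => hdelta c hc (by simp [PySem.Set.empty])
      exact absurd hl (not_hasLib_of_closed hmem hset)

-- ---- B side ----

lemma bDirsB_spec (board : List (List Int)) (o : Int) (c : Int × Int) :
    ∀ (dirs stack : List (Int × Int)) seen found stack' seen',
      (∀ d ∈ dirs, d ∈ bNbrs c.1 c.2) →
      bDirsB board o dirs stack seen = (found, stack', seen') →
      (found = true → ∃ d ∈ bNbrs c.1 c.2, InG board d ∧ pvCell board d.1 d.2 = 0) ∧
      (found = false →
        (∀ e ∈ seen, e ∈ seen') ∧
        (∀ e ∈ stack, e ∈ stack') ∧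
        (∀ e ∈ stack', e ∈ stack ∨ (e ∈ seen' ∧ ¬ e ∈ seen)) ∧
        (∀ e ∈ seen', e ∈ seen ∨
          (e ∈ stack' ∧ InG board e ∧ pvCell board e.1 e.2 = o ∧ Adj c e)) ∧
        (∀ d ∈ dirs, InG board d → pvCell board d.1 d.2 ≠ 0 ∧
          (pvCell board d.1 d.2 = o → d ∈ seen')) ∧
        stack'.length + 2 * unvis board seen' ≤ stack.length + 2 * unvis board seen) := by
  intro dirs
  induction dirs with
  | nil =>
    intro stack seen found stack' seen' _ h
    simp only [bDirsB, Prod.mk.injEq] at h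
    obtain ⟨rfl, rfl, rfl⟩ := h
    refine ⟨by simp, fun _ => ⟨fun e he => he, fun e he => he, fun e he => Or.inl he,
      fun e he => Or.inl he, by simp, le_refl _⟩⟩
  | cons d rest ih =>
    obtain ⟨nx, ny⟩ := d
    intro stack seen found stack' seen' hdirs h
    have hdnb : (nx, ny) ∈ bNbrs c.1 c.2 := hdirs _ List.mem_cons_self
    have hrest : ∀ d ∈ rest, d ∈ bNbrs c.1 c.2 := fun d hd => hdirs d (List.mem_cons_of_mem _ hd)
    simp only [bDirsB] at h
    by_cases hb : 0 ≤ nx ∧ nx < PySem.List.len board ∧ 0 ≤ ny ∧ ny < PySem.List.len board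
    · rw [if_pos hb] at h
      by_cases h0 : pvCell board nx ny = 0
      · rw [if_pos h0] at h
        simp only [Prod.mk.injEq] at h
        obtain ⟨rfl, rfl, rfl⟩ := h
        exact ⟨fun _ => ⟨(nx, ny), hdnb, hb, h0⟩, by simp⟩
      · rw [if_neg h0] at h
        by_cases hpu : pvCell board nx ny = o ∧ ¬ (nx, ny) ∈ seen
        · rw [if_pos hpu] at h
          have H := ih ((nx, ny) :: stack) (PySem.Set.add seen (nx, ny)) found stack' seen'
            hrest h
          refine ⟨H.1, ?_⟩
          intro hf
          obtain ⟨m1, m2, m3, m4, m5, m6⟩ := H.2 hf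
          have hma : ∀ e, e ∈ PySem.Set.add seen (nx, ny) ↔ e ∈ seen ∨ e = (nx, ny) :=
            fun e => PySem.Set.mem_add seen (nx, ny) e
          refine ⟨fun e he => m1 e ((hma e).mpr (Or.inl he)),
            fun e he => m2 e (List.mem_cons_of_mem _ he), ?_, ?_, ?_, ?_⟩
          · intro e he
            rcases m3 e he with h' | ⟨hs', hn'⟩
            · rcases List.mem_cons.mp h' with rfl | h''
              · exact Or.inr ⟨m1 _ ((hma _).mpr (Or.inr rfl)), hpu.2⟩
              · exact Or.inl h''
            · exact Or.inr ⟨hs', fun he2 => hn' ((hma e).mpr (Or.inl he2))⟩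
          · intro e he
            rcases m4 e he with h' | hnew
            · rcases (hma e).mp h' with hseen | rfl
              · exact Or.inl hseen
              · exact Or.inr ⟨m2 _ List.mem_cons_self, hb, hpu.1, hdnb⟩
            · exact Or.inr hnew
          · intro d hd
            rcases List.mem_cons.mp hd with rfl | hd'
            · exact fun _ => ⟨h0, fun _ => m1 _ ((hma _).mpr (Or.inr rfl))⟩
            · exact m5 d hd'
          · have hu : unvis board (PySem.Set.add seen (nx, ny)) < unvis board seen :=
              unvis_add_lt hb hpu.2
            simp only [List.length_cons] at m6
            omega
        · rw [if_neg hpu] at h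
          have H := ih stack seen found stack' seen' hrest h
          refine ⟨H.1, ?_⟩
          intro hf
          obtain ⟨m1, m2, m3, m4, m5, m6⟩ := H.2 hf
          refine ⟨m1, m2, m3, m4, ?_, m6⟩
          intro d hd
          rcases List.mem_cons.mp hd with rfl | hd'
          · refine fun _ => ⟨h0, fun ho => ?_⟩
            have hns : (nx, ny) ∈ seen := by
              by_contra hns
              exact hpu ⟨ho, hns⟩
            exact m1 _ hns
          · exact m5 d hd'
    · rw [if_neg hb] at h
      have H := ih stack seen found stack' seen' hrest h
      refine ⟨H.1, ?_⟩
      intro hf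
      obtain ⟨m1, m2, m3, m4, m5, m6⟩ := H.2 hf
      refine ⟨m1, m2, m3, m4, ?_, m6⟩
      intro d hd
      rcases List.mem_cons.mp hd with rfl | hd'
      · exact fun hing => absurd hing hb
      · exact m5 d hd' 

lemma bLoop_spec (board : List (List Int)) (o : Int) (s : Int × Int) :
    ∀ (fuel : Nat) (stack : List (Int × Int)) seen,
      s ∈ seen →
      (∀ e ∈ stack, e ∈ seen) →
      (∀ e ∈ seen, InG board e ∧ pvCell board e.1 e.2 = o ∧ ReachP board o s e) →
      (∀ e ∈ seen, ¬ e ∈ stack → Settled board o seen e) →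
      stack.length + 2 * unvis board seen < fuel →
      (bLoop board o fuel stack seen = true ↔ HasLib board o s) := by
  intro fuel
  induction fuel with
  | zero => intro stack seen _ _ _ _ hm; omega
  | succ fuel ih =>
    intro stack seen hs hss hsp hproc hm
    cases stack with
    | nil =>
      have hnl : ¬ HasLib board o s :=
        not_hasLib_of_closed hs (fun c hc => hproc c hc (by simp))
      simp [bLoop, hnl]
    | cons hd stack =>
      obtain ⟨cx, cy⟩ := hd
      simp only [bLoop]
      rcases hdd : bDirsB board o (bNbrs cx cy) stack seen with ⟨found, stack', seen'⟩
      have H := bDirsB_spec board o (cx, cy) (bNbrs cx cy) stack seen found stack' seen'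
        (fun d hd => hd) hdd
      cases found
      · obtain ⟨m1, m2, m3, m4, m5, m6⟩ := H.2 rfl
        have hs' : s ∈ seen' := m1 s hs
        have hss' : ∀ e ∈ stack', e ∈ seen' := by
          intro e he
          rcases m3 e he with h' | ⟨h', _⟩
          · exact m1 e (hss e (List.mem_cons_of_mem _ h'))
          · exact h'
        have hrc : ReachP board o s (cx, cy) := (hsp (cx, cy) (hss _ List.mem_cons_self)).2.2
        have hsp' : ∀ e ∈ seen', InG board e ∧ pvCell board e.1 e.2 = o ∧ ReachP board o s e := by
          intro e he
          rcases m4 e he with hold | ⟨_, hing, hcell, hadj⟩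
          · exact hsp e hold
          · exact ⟨hing, hcell, ReachP.step hrc hing hadj hcell⟩
        have hproc' : ∀ e ∈ seen', ¬ e ∈ stack' → Settled board o seen' e := by
          intro e he hns
          rcases m4 e he with hold | ⟨hstk, _, _, _⟩
          · by_cases hec : e = (cx, cy)
            · subst hec
              intro d hd hing
              exact m5 d hd hing
            · have hnm : ¬ e ∈ (cx, cy) :: stack := by
                intro hmem
                rcases List.mem_cons.mp hmem with h' | h'
                · exact hec h'
                · exact hns (m2 e h')
              exact Settled_mono m1 (hproc e hold hnm)
          · exact absurd hstk hns
        have hm' : stack'.length + 2 * unvis board seen' < fuel := by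
          simp only [List.length_cons] at hm
          omega
        exact ih stack' seen' hs' hss' hsp' hproc' hm'
      · obtain ⟨d, hdnb, hding, hd0⟩ := H.1 rfl
        have hrc : ReachP board o s (cx, cy) := (hsp (cx, cy) (hss _ List.mem_cons_self)).2.2
        have hl : HasLib board o s := ⟨(cx, cy), d, hrc, hdnb, hding, hd0⟩
        simp [hl]

lemma groupHasLiberty_iff (board : List (List Int)) (x y o : Int)
    (hin : InG board (x, y)) (hc : pvCell board x y = o) :
    (groupHasLiberty board x y o = true ↔ HasLib board o (x, y)) := by
  have hms : ∀ e, e ∈ PySem.Set.ofList [(x, y)] ↔ e = (x, y) := by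
    intro e
    rw [PySem.Set.mem_ofList]
    simp
  unfold groupHasLiberty
  apply bLoop_spec board o (x, y)
  · exact (hms _).mpr rfl
  · intro e he
    exact (hms _).mpr (by simpa using he)
  · intro e he
    rw [hms e] at he
    subst he
    exact ⟨hin, hc, ReachP.base⟩
  · intro e he hns
    rw [hms e] at he
    exact absurd (by simp [he]) hns
  · have hu := unvis_le board (PySem.Set.ofList [(x, y)])
    have hr : 2 * board.length * board.length = 2 * (board.length * board.length) := by ring
    simp only [List.length_cons, List.length_nil]
    rw [hr]
    omega

-- ---- the two liberty checks agree; the two scans agree ----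

lemma check_eq (board : List (List Int)) (x y opponent : Int)
    (hin : InG board (x, y)) (hc : pvCell board x y = opponent) :
    libcheckA board x y = groupHasLiberty board x y opponent := by
  rw [Bool.eq_iff_iff, libcheckA_iff board x y hin, hc,
    groupHasLiberty_iff board x y opponent hin hc]

lemma length_pvSetCell (board : List (List Int)) (x y : Int) :
    (pvSetCell board x y).length = board.length := by
  simp [pvSetCell, PySem.List.length_pySetD]

-- relation between A's scan state (board, captured, count) and B's (board, count)
def StRel (N : Nat) (sA : List (List Int) × Bool × Int) (sB : List (List Int) × Int) : Prop :=
  sA.1 = sB.1 ∧ sA.2.2 = sB.2 ∧ sA.2.1 = decide (0 < sB.2) ∧ 0 ≤ sB.2 ∧ sB.1.length = N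

lemma step_eq (opponent : Int) (N : Nat) (x y : Int) (b : List (List Int)) (capt : Bool)
    (cnt : Int) (hlen : b.length = N) (hcap : capt = decide (0 < cnt)) (hcnt : 0 ≤ cnt)
    (hx : 0 ≤ x ∧ x < (N : Int)) (hy : 0 ≤ y ∧ y < (N : Int)) :
    StRel N (captureStepA opponent (b, capt, cnt) x y) (captureStepB opponent (b, cnt) x y) := by
  by_cases hco : pvCell b x y = opponent
  · have hin : InG b (x, y) :=
      ⟨hx.1, by rw [PySem.List.len_eq, hlen]; exact hx.2,
       hy.1, by rw [PySem.List.len_eq, hlen]; exact hy.2⟩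
    have hg := check_eq b x y opponent hin hco
    by_cases hl : groupHasLiberty b x y opponent = false
    · have hA : captureStepA opponent (b, capt, cnt) x y = (pvSetCell b x y, true, cnt + 1) := by
        simp [captureStepA, hco, hg, hl]
      have hB : captureStepB opponent (b, cnt) x y = (pvSetCell b x y, cnt + 1) := by
        simp [captureStepB, hco, hl]
      rw [hA, hB]
      have hpos : (0 : Int) < cnt + 1 := by omega
      exact ⟨rfl, rfl, by simp [hpos], by omega, by rw [length_pvSetCell]; exact hlen⟩
    · have ht : groupHasLiberty b x y opponent = true := by
        revert hl; cases groupHasLiberty b x y opponent <;> simp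
      have hA : captureStepA opponent (b, capt, cnt) x y = (b, capt, cnt) := by
        simp [captureStepA, hg, ht]
      have hB : captureStepB opponent (b, cnt) x y = (b, cnt) := by
        simp [captureStepB, ht]
      rw [hA, hB]
      exact ⟨rfl, rfl, hcap, hcnt, hlen⟩
  · have hA : captureStepA opponent (b, capt, cnt) x y = (b, capt, cnt) := by
      simp [captureStepA, hco]
    have hB : captureStepB opponent (b, cnt) x y = (b, cnt) := by
      simp [captureStepB, hco]
    rw [hA, hB]
    exact ⟨rfl, rfl, hcap, hcnt, hlen⟩

lemma inner_eq (opponent : Int) (N : Nat) (x : Int) (hx : 0 ≤ x ∧ x < (N : Int)) :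
    ∀ (ys : List Int) (b : List (List Int)) (capt : Bool) (cnt : Int),
      b.length = N → capt = decide (0 < cnt) → 0 ≤ cnt →
      (∀ y ∈ ys, 0 ≤ y ∧ y < (N : Int)) →
      StRel N (ys.foldl (fun st y => captureStepA opponent st x y) (b, capt, cnt))
        (ys.foldl (fun st y => captureStepB opponent st x y) (b, cnt)) := by
  intro ys
  induction ys with
  | nil => exact fun b capt cnt hlen hcap hcnt _ => ⟨rfl, rfl, hcap, hcnt, hlen⟩
  | cons y ys ih =>
    intro b capt cnt hlen hcap hcnt hys
    have hy := hys y List.mem_cons_self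
    have hst := step_eq opponent N x y b capt cnt hlen hcap hcnt hx hy
    obtain ⟨h1, h2, h3, h4, h5⟩ := hst
    rw [List.foldl_cons, List.foldl_cons]
    have hA : captureStepA opponent (b, capt, cnt) x y =
        ((captureStepB opponent (b, cnt) x y).1,
         decide (0 < (captureStepB opponent (b, cnt) x y).2),
         (captureStepB opponent (b, cnt) x y).2) := Prod.ext h1 (Prod.ext h3 h2)
    have hB : captureStepB opponent (b, cnt) x y =
        ((captureStepB opponent (b, cnt) x y).1, (captureStepB opponent (b, cnt) x y).2) := rfl
    rw [hA, hB]
    exact ih _ _ _ h5 rfl h4 (fun y hy => hys y (List.mem_cons_of_mem _ hy))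

lemma outer_eq (opponent : Int) (N : Nat) :
    ∀ (xs : List Int) (b : List (List Int)) (capt : Bool) (cnt : Int),
      b.length = N → capt = decide (0 < cnt) → 0 ≤ cnt →
      (∀ x ∈ xs, 0 ≤ x ∧ x < (N : Int)) →
      StRel N (xs.foldl (fun st x =>
          (PySem.List.pyRange 0 (PySem.List.len st.1)).foldl
            (fun st y => captureStepA opponent st x y) st) (b, capt, cnt))
        (xs.foldl (fun st x =>
          (PySem.List.pyRange 0 (N : Int)).foldl
            (fun st y => captureStepB opponent st x y) st) (b, cnt)) := by
  intro xs
  induction xs with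
  | nil => exact fun b capt cnt hlen hcap hcnt _ => ⟨rfl, rfl, hcap, hcnt, hlen⟩
  | cons x xs ih =>
    intro b capt cnt hlen hcap hcnt hxs
    have hx := hxs x List.mem_cons_self
    rw [List.foldl_cons, List.foldl_cons]
    have hlenb : PySem.List.len (b, capt, cnt).1 = (N : Int) := by
      rw [PySem.List.len_eq, hlen]
    rw [hlenb]
    have hst := inner_eq opponent N x hx (PySem.List.pyRange 0 (N : Int)) b capt cnt
      hlen hcap hcnt (fun y hy => PySem.List.mem_pyRange_one.mp hy)
    obtain ⟨h1, h2, h3, h4, h5⟩ := hst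
    set sB := (PySem.List.pyRange 0 (N : Int)).foldl
      (fun st y => captureStepB opponent st x y) (b, cnt) with hsB
    have hA : (PySem.List.pyRange 0 (N : Int)).foldl
        (fun st y => captureStepA opponent st x y) (b, capt, cnt) =
        (sB.1, decide (0 < sB.2), sB.2) := Prod.ext h1 (Prod.ext h3 h2)
    rw [hA]
    have hB : sB = (sB.1, sB.2) := rfl
    rw [hB]
    exact ih _ _ _ h5 rfl h4 (fun x hx => hxs x (List.mem_cons_of_mem _ hx))

-- ===== VERDICT (by name: the statement is the Claim_ definition above) =====
theorem capture_spec : Claim_equal_capture := by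
  unfold Claim_equal_capture
  intro board player _hdom _hpre
  unfold Spec_capture capture capture_alt
  have h := outer_eq (3 - player) board.length (PySem.List.pyRange 0 (PySem.List.len board))
    board false 0 rfl (by decide) (by decide)
    (by intro x hx; rw [PySem.List.len_eq] at hx; exact PySem.List.mem_pyRange_one.mp hx)
  rw [PySem.List.len_eq] at h ⊢
  exact Prod.ext h.2.2.1 h.2.1
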